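-- pv_equiv track=rewrite | github.com/majung2/CTpractice | python/2020하반기/2020WinterCoding/03.py | solution
-- ===== SOURCE A (Python) =====
-- def dfs(j_type, x, y, v, check, n):
--     dx, dy = [-1,0,1,0], [0,1,0,-1]
--     if check[x][y]:
--         return
--     else:
--         check[x][y] = 1
--
--         for i in range(4):
--             xx, yy = x + dx[i], y + dy[i]
--             if xx < 0 or xx >= n or yy < 0 or yy >= n:
--                 continue
--             elif v[xx][yy] != j_type:
--                 continue
--             else:
--                 dfs(j_type, xx, yy, v, check, n)
--         return
--
-- def solution(v):
--     n = len(v)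
--     answer = [0 for _ in range(3)]
--     check = [[0 for _ in range(n)] for _ in range(n)]
--
--     for i in range(n):
--         for j in range(n):
--             if not check[i][j]:
--                 jak = v[i][j]
--                 dfs(v[i][j], i, j, v, check, n)
--                 answer[jak] += 1
--
--     return answer
-- ===== SOURCE B (Python) =====
-- def solution(v):
--     n = len(v)
--     answer = [0, 0, 0]
--     check = [[0] * n for _ in range(n)]
--     for i in range(n):
--         for j in range(n):
--             if not check[i][j]:
--                 color = v[i][j]
--                 stack = [(i, j)]
--                 while stack:
--                     x, y = stack.pop()
--                     if check[x][y]: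
--                         continue
--                     check[x][y] = 1
--                     for xx, yy in ((x, y - 1), (x + 1, y), (x, y + 1), (x - 1, y)):
--                         if 0 <= xx < n and 0 <= yy < n and v[xx][yy] == color:
--                             stack.append((xx, yy))
--                 answer[color] += 1
--     return answer
-- ===== Notes on version B (the rewrite author's own statement) =====
-- stated objective: alternative
-- what changed: The recursive DFS helper is replaced by an iterative flood fill with an explicit stack inside the scan loop, so no recursion (and no helper function) is needed.
-- outside the precondition, e.g. on solution([[5]]): A raises IndexError, B raises IndexError; on solution([[0, 1], [0]]): A raises IndexError, B raises IndexError
import Mathlib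
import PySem

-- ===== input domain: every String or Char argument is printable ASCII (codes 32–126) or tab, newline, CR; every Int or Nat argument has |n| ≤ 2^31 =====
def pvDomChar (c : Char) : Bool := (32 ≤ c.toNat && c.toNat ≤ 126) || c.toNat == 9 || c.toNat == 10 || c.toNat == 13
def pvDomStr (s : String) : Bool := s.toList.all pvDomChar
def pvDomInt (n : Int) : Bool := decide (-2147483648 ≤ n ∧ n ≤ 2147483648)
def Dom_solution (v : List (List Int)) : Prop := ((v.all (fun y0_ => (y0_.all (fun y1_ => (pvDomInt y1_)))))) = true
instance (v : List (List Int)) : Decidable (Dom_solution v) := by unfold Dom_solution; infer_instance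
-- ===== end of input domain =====

-- B replaces A's recursive DFS helper by an iterative flood fill with an explicit stack (same cost);
-- equivalence is about the return value (A and B only mutate their local `check`/`answer`).

-- Shared indexing helpers: g[x][y] read, and the write check[x][y] = val.
-- get2 is exact (pyGet?); set2 is exact for the nonnegative in-range indices the ports use
-- (the ports only ever write at indices previously read successfully with 0 ≤ x, 0 ≤ y).
def get2 (g : List (List Int)) (x y : Int) : Option Int :=
  match PySem.List.pyGet? g x with
  | none => none
  | some row => PySem.List.pyGet? row y

def set2 (g : List (List Int)) (x y : Int) (val : Int) : List (List Int) :=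
  if 0 ≤ x ∧ 0 ≤ y then g.set x.toNat ((g.getD x.toNat []).set y.toNat val) else g

-- answer[i] += 1 (Python negative-index wraparound; none = IndexError, excluded by Pre_)
def incAns (a : List Int) (i : Int) : List Int :=
  match PySem.List.pyGet? a i with
  | none => a
  | some t => PySem.List.pySetD a (if i < 0 then i + a.length else i) (t + 1)

-- number of unmarked (= 0) cells of the check grid: termination measure for B's stack loop
def zeros (g : List (List Int)) : Nat :=
  (g.map (fun row => row.countP (fun c => c = 0))).sum

-- termination lemmas for floodB (cited by decreasing_by, hence placed above the ports)
theorem countP_zero_set_one_lt : ∀ (row : List Int) (k : Nat), row[k]? = some 0 →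
    (row.set k (1:Int)).countP (fun c => decide (c = 0)) < row.countP (fun c => decide (c = 0)) := by
  intro row
  induction row with
  | nil => intro k h; simp at h
  | cons a t ih =>
    intro k h
    cases k with
    | zero => simp_all
    | succ k => simpa [List.countP_cons] using ih k (by simpa using h)

theorem zeros_set_row_lt : ∀ (g : List (List Int)) (k : Nat) (row row' : List Int),
    g[k]? = some row →
    row'.countP (fun c => decide (c = 0)) < row.countP (fun c => decide (c = 0)) →
    zeros (g.set k row') < zeros g := by
  intro g
  induction g with
  | nil => intro k row row' h; simp at h
  | cons r t ih =>
    intro k row row' h hlt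
    cases k with
    | zero =>
      simp only [List.getElem?_cons_zero, Option.some.injEq] at h
      subst h
      simp only [List.set_cons_zero, zeros, List.map_cons, List.sum_cons]
      omega
    | succ k =>
      have := ih k row row' (by simpa using h) hlt
      simp only [List.set_cons_succ, zeros, List.map_cons, List.sum_cons] at *
      omega

theorem zeros_set2_lt (g : List (List Int)) (x y : Int)
    (hx : 0 ≤ x) (hy : 0 ≤ y) (h : get2 g x y = some 0) :
    zeros (set2 g x y 1) < zeros g := by
  unfold get2 at h
  rcases hrow : PySem.List.pyGet? g x with _ | row
  · rw [hrow] at h; exact absurd h (by simp)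
  · rw [hrow] at h
    have h' : PySem.List.pyGet? row y = some 0 := h
    rw [PySem.List.pyGet?_of_nonneg g hx] at hrow
    rw [PySem.List.pyGet?_of_nonneg row hy] at h'
    have hgd : g.getD x.toNat [] = row := by
      simp [List.getD_eq_getElem?_getD, hrow]
    unfold set2
    rw [if_pos ⟨hx, hy⟩, hgd]
    exact zeros_set_row_lt g x.toNat row _ hrow (countP_zero_set_one_lt row y.toNat h')

-- ===== PORT A =====
-- dfs(j_type, x, y, v, check, n); `fuel` is only a totality guard: the recursion depth is
-- bounded by zeros check + 1 (each nested call has marked one more cell), and solution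
-- passes fuel = n*n+1 > zeros check, so the fuel never runs out on any call the port makes.
-- get2 = none cases are Python IndexErrors, excluded by Pre_solution.
def dfsA (fuel : Nat) (j x y : Int) (v check : List (List Int)) (n : Int) : List (List Int) :=
  match fuel with
  | 0 => check
  | fuel + 1 =>
    match get2 check x y with
    | none => check
    | some c =>
      if c ≠ 0 then check
      else
        -- for i in range(4): zip of dx = [-1,0,1,0] and dy = [0,1,0,-1]
        ([((-1:Int), (0:Int)), (0, 1), (1, 0), (0, -1)]).foldl
          (fun ch d =>
            if x + d.1 < 0 ∨ n ≤ x + d.1 ∨ y + d.2 < 0 ∨ n ≤ y + d.2 then ch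
            else if get2 v (x + d.1) (y + d.2) ≠ some j then ch
            else dfsA fuel j (x + d.1) (y + d.2) v ch n)
          (set2 check x y 1)

def solution (v : List (List Int)) : List Int :=
  let n : Int := v.length
  let check0 : List (List Int) := List.replicate v.length (List.replicate v.length (0:Int))
  ((PySem.List.pyRange 0 n 1).foldl (fun st i =>
      (PySem.List.pyRange 0 n 1).foldl (fun st j =>
        match get2 st.2 i j with
        | none => st
        | some c =>
          if c ≠ 0 then st
          else
            match get2 v i j with
            | none => st
            | some jak => (incAns st.1 jak, dfsA (v.length * v.length + 1) jak i j v st.2 n)) st)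
    (([0, 0, 0] : List Int), check0)).1

-- ===== PORT B =====
-- Source B's push tuple ((x,y-1),(x+1,y),(x,y+1),(x-1,y)) appended to the stack's end, listed here
-- in pop (= reverse push) order; the Lean list's head is the top (end) of Source B's stack.
def nbrsB (v : List (List Int)) (color n x y : Int) : List (Int × Int) :=
  ((([((-1:Int), (0:Int)), (0, 1), (1, 0), (0, -1)]).map (fun d => (x + d.1, y + d.2))).filter
    (fun p => !(decide (p.1 < 0 ∨ n ≤ p.1 ∨ p.2 < 0 ∨ n ≤ p.2)) && (get2 v p.1 p.2 == some color)))

-- while stack: x, y = stack.pop(); …   The `x < 0 ∨ y < 0` branch is a totality guard only: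
-- every entry ever pushed is bounds-checked (and the scan pushes (i,j) with 0 ≤ i,j).
def floodB (v : List (List Int)) (color n : Int) (check : List (List Int)) :
    List (Int × Int) → List (List Int)
  | [] => check
  | (x, y) :: s =>
    if _hxy : x < 0 ∨ y < 0 then floodB v color n check s
    else
      match _hg : get2 check x y with
      | none => floodB v color n check s
      | some c =>
        if _hc : c ≠ 0 then floodB v color n check s
        else floodB v color n (set2 check x y 1) (nbrsB v color n x y ++ s)
  termination_by stack => 5 * zeros check + stack.length
  decreasing_by
  all_goals
    first
    | (simp only [List.length_cons]; omega)
    | (have hc0 : c = 0 := by omega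
       have h1 : zeros (set2 check x y 1) < zeros check :=
         zeros_set2_lt check x y (by omega) (by omega) (hc0 ▸ _hg)
       have h2 : (nbrsB v color n x y).length ≤ 4 := by
         have := List.length_filter_le
           (fun p : Int × Int => !(decide (p.1 < 0 ∨ n ≤ p.1 ∨ p.2 < 0 ∨ n ≤ p.2)) && (get2 v p.1 p.2 == some color))
           (([((-1:Int), (0:Int)), (0, 1), (1, 0), (0, -1)]).map (fun d => (x + d.1, y + d.2)))
         simpa [nbrsB] using this
       simp only [List.length_append, List.length_cons]
       omega)

def solution_alt (v : List (List Int)) : List Int :=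
  let n : Int := v.length
  let check0 : List (List Int) := List.replicate v.length (List.replicate v.length (0:Int))
  ((PySem.List.pyRange 0 n 1).foldl (fun st i =>
      (PySem.List.pyRange 0 n 1).foldl (fun st j =>
        match get2 st.2 i j with
        | none => st
        | some c =>
          if c ≠ 0 then st
          else
            match get2 v i j with
            | none => st
            | some color => (incAns st.1 color, floodB v color n st.2 [(i, j)])) st)
    (([0, 0, 0] : List Int), check0)).1

-- ===== PRECONDITION & SPEC =====
-- Pre_ excludes exactly the inputs where Python A raises IndexError: a row shorter than len(v)
-- (v[i][j] out of range), or a used cell value outside -3..2 (answer[jak] out of range;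
-- values -3..-1 wrap around in Python and are admitted). Columns past len(v) are never used.
def Pre_solution (v : List (List Int)) : Prop :=
  ∀ row ∈ v, v.length ≤ row.length ∧ ∀ x ∈ row.take v.length, -3 ≤ x ∧ x ≤ 2
instance (v : List (List Int)) : Decidable (Pre_solution v) := by unfold Pre_solution; infer_instance
def pvWitness_solution : List (List Int) := [[0, 1], [1, 2]]

def Spec_solution (v : List (List Int)) (out : List Int) : Prop := out = solution_alt v
instance (v : List (List Int)) (out : List Int) : Decidable (Spec_solution v out) := by unfold Spec_solution; infer_instance

-- ===== CLAIM (what is proved, stated in full; the proofs are below) =====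
def Claim_equal_solution : Prop := ∀ (v : List (List Int)), Dom_solution v → Pre_solution v → Spec_solution v (solution v)

-- ===== LEMMAS AND PROOFS =====

-- zeros can only shrink when a cell is overwritten with 1
theorem countP_zero_set_one_le : ∀ (row : List Int) (k : Nat),
    (row.set k (1:Int)).countP (fun c => decide (c = 0)) ≤ row.countP (fun c => decide (c = 0)) := by
  intro row
  induction row with
  | nil => intro k; simp
  | cons a t ih =>
    intro k
    cases k with
    | zero => simp [List.countP_cons]; try omega
    | succ k => have := ih k; simp [List.countP_cons]; try omega

theorem zeros_set_row_le : ∀ (g : List (List Int)) (k : Nat) (row' : List Int),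
    row'.countP (fun c => decide (c = 0)) ≤ (g.getD k []).countP (fun c => decide (c = 0)) →
    zeros (g.set k row') ≤ zeros g := by
  intro g
  induction g with
  | nil => intro k row' _; simp [List.set]
  | cons r t ih =>
    intro k row' h
    cases k with
    | zero =>
      simp only [List.getD_cons_zero] at h
      simp only [List.set_cons_zero, zeros, List.map_cons, List.sum_cons]
      omega
    | succ k =>
      have := ih k row' (by simpa using h)
      simp only [List.set_cons_succ, zeros, List.map_cons, List.sum_cons] at *
      omega

theorem zeros_set2_le (g : List (List Int)) (x y : Int) :
    zeros (set2 g x y 1) ≤ zeros g := by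
  unfold set2
  split
  · exact zeros_set_row_le g x.toNat _ (countP_zero_set_one_le _ y.toNat)
  · exact le_refl _

theorem zeros_foldl_le {β : Type} (g : List (List Int) → β → List (List Int))
    (hg : ∀ ch b, zeros (g ch b) ≤ zeros ch) :
    ∀ (l : List β) (ch : List (List Int)), zeros (l.foldl g ch) ≤ zeros ch := by
  intro l
  induction l with
  | nil => intro ch; simp
  | cons b t ih => intro ch; exact le_trans (ih (g ch b)) (hg ch b)

theorem dfsA_zeros : ∀ (fuel : Nat) (j x y : Int) (v ch : List (List Int)) (n : Int),
    zeros (dfsA fuel j x y v ch n) ≤ zeros ch := by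
  intro fuel
  induction fuel with
  | zero => intro j x y v ch n; simp [dfsA]
  | succ fuel ih =>
    intro j x y v ch n
    rw [dfsA]
    split
    · exact le_refl _
    · split
      · exact le_refl _
      · refine le_trans (zeros_foldl_le _ ?_ _ _) (zeros_set2_le ch x y)
        intro ch' d
        split
        · exact le_refl _
        · split
          · exact le_refl _
          · exact ih j (x + d.1) (y + d.2) v ch' n

-- unfoldings of dfsA, with the neighbour loop rephrased over the filtered neighbour list
theorem dfsA_succ_none (v : List (List Int)) (n j x y : Int) (f : Nat) (ch : List (List Int))
    (hg : get2 ch x y = none) : dfsA (f + 1) j x y v ch n = ch := by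
  rw [dfsA, hg]

theorem dfsA_succ_stop (v : List (List Int)) (n j x y c : Int) (f : Nat) (ch : List (List Int))
    (hg : get2 ch x y = some c) (hc : c ≠ 0) : dfsA (f + 1) j x y v ch n = ch := by
  rw [dfsA, hg]
  show (if c ≠ 0 then ch else _) = ch
  rw [if_pos hc]

theorem dfsA_succ_go (v : List (List Int)) (n j x y : Int) (f : Nat) (ch : List (List Int))
    (hg : get2 ch x y = some 0) :
    dfsA (f + 1) j x y v ch n =
      (nbrsB v j n x y).foldl (fun c p => dfsA f j p.1 p.2 v c n) (set2 ch x y 1) := by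
  rw [dfsA, hg]
  show (if (0:Int) ≠ 0 then ch else _) = _
  rw [if_neg (by omega)]
  unfold nbrsB
  rw [List.foldl_filter, List.foldl_map]
  apply List.foldl_ext
  intro ch' d _
  by_cases h1 : x + d.1 < 0 ∨ n ≤ x + d.1 ∨ y + d.2 < 0 ∨ n ≤ y + d.2
  · simp [h1]
  · by_cases h2 : get2 v (x + d.1) (y + d.2) = some j
    · simp [h1, h2]
    · simp [h1, h2]

-- unfoldings of floodB on a stack whose top has nonnegative coordinates
theorem floodB_nil (v : List (List Int)) (color n : Int) (ch : List (List Int)) :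
    floodB v color n ch [] = ch := by
  rw [floodB]

theorem floodB_cons_none (v : List (List Int)) (color n x y : Int) (ch : List (List Int))
    (s : List (Int × Int)) (hx : 0 ≤ x) (hy : 0 ≤ y) (hg : get2 ch x y = none) :
    floodB v color n ch ((x, y) :: s) = floodB v color n ch s := by
  rw [floodB, dif_neg (by omega), hg]

theorem floodB_cons_stop (v : List (List Int)) (color n x y c : Int) (ch : List (List Int))
    (s : List (Int × Int)) (hx : 0 ≤ x) (hy : 0 ≤ y) (hg : get2 ch x y = some c)
    (hc : c ≠ 0) : floodB v color n ch ((x, y) :: s) = floodB v color n ch s := by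
  rw [floodB, dif_neg (by omega), hg]
  show (if _ : c ≠ 0 then _ else _) = _
  rw [dif_pos hc]

theorem floodB_cons_go (v : List (List Int)) (color n x y : Int) (ch : List (List Int))
    (s : List (Int × Int)) (hx : 0 ≤ x) (hy : 0 ≤ y) (hg : get2 ch x y = some 0) :
    floodB v color n ch ((x, y) :: s) =
      floodB v color n (set2 ch x y 1) (nbrsB v color n x y ++ s) := by
  rw [floodB, dif_neg (by omega), hg]
  show (if _ : (0:Int) ≠ 0 then _ else _) = _
  rw [dif_neg (by omega)]

theorem mem_nbrsB_nonneg (v : List (List Int)) (color n x y : Int) :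
    ∀ p ∈ nbrsB v color n x y, 0 ≤ p.1 ∧ 0 ≤ p.2 := by
  intro p hp
  unfold nbrsB at hp
  have := (List.mem_filter.mp hp).2
  simp only [Bool.and_eq_true, Bool.not_eq_true', decide_eq_false_iff_not, not_or, not_lt] at this
  exact ⟨this.1.1, this.1.2.2.1⟩

-- processing a list of pending cells one after the other = folding dfsA over them
theorem simList (v : List (List Int)) (color n : Int) (k f' : Nat)
    (IH : ∀ ch, zeros ch ≤ k → ∀ f, zeros ch < f → ∀ x y, 0 ≤ x → 0 ≤ y → ∀ s,
      floodB v color n ch ((x, y) :: s) = floodB v color n (dfsA f color x y v ch n) s) :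
    ∀ (l : List (Int × Int)) (ch : List (List Int)) (s : List (Int × Int)),
      (∀ p ∈ l, 0 ≤ p.1 ∧ 0 ≤ p.2) → zeros ch ≤ k → zeros ch < f' →
      floodB v color n ch (l ++ s) =
        floodB v color n (l.foldl (fun c p => dfsA f' color p.1 p.2 v c n) ch) s := by
  intro l
  induction l with
  | nil => intro ch s _ _ _; rfl
  | cons p t ih =>
    intro ch s hl hk hf
    have hp := hl p (by simp)
    obtain ⟨px, py⟩ := p
    calc floodB v color n ch ((px, py) :: (t ++ s))
        = floodB v color n (dfsA f' color px py v ch n) (t ++ s) :=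
          IH ch hk f' hf px py hp.1 hp.2 (t ++ s)
      _ = _ := by
          refine ih _ s (fun q hq => hl q (by simp [hq])) ?_ ?_
          · exact le_trans (dfsA_zeros f' color px py v ch n) hk
          · exact lt_of_le_of_lt (dfsA_zeros f' color px py v ch n) hf

-- THE SIMULATION: popping a cell and flooding the stack = running A's recursive dfs on it first
theorem sim (v : List (List Int)) (color n : Int) :
    ∀ (k : Nat) (ch : List (List Int)), zeros ch ≤ k → ∀ f, zeros ch < f →
      ∀ x y, 0 ≤ x → 0 ≤ y → ∀ s,
      floodB v color n ch ((x, y) :: s) = floodB v color n (dfsA f color x y v ch n) s := by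
  intro k
  induction k with
  | zero =>
    intro ch hk f hf x y hx hy s
    rcases f with _ | f'
    · omega
    rcases hg : get2 ch x y with _ | c
    · rw [floodB_cons_none v color n x y ch s hx hy hg, dfsA_succ_none v n color x y f' ch hg]
    · by_cases hc : c ≠ 0
      · rw [floodB_cons_stop v color n x y c ch s hx hy hg hc,
            dfsA_succ_stop v n color x y c f' ch hg hc]
      · have hc0 : c = 0 := by omega
        subst hc0
        exact absurd (zeros_set2_lt ch x y hx hy hg) (by omega)
  | succ k ihk =>
    intro ch hk f hf x y hx hy s
    rcases f with _ | f'
    · omega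
    rcases hg : get2 ch x y with _ | c
    · rw [floodB_cons_none v color n x y ch s hx hy hg, dfsA_succ_none v n color x y f' ch hg]
    · by_cases hc : c ≠ 0
      · rw [floodB_cons_stop v color n x y c ch s hx hy hg hc,
            dfsA_succ_stop v n color x y c f' ch hg hc]
      · have hc0 : c = 0 := by omega
        subst hc0
        rw [floodB_cons_go v color n x y ch s hx hy hg, dfsA_succ_go v n color x y f' ch hg]
        have hlt : zeros (set2 ch x y 1) < zeros ch := zeros_set2_lt ch x y hx hy hg
        exact simList v color n k f' ihk (nbrsB v color n x y) (set2 ch x y 1) s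
          (mem_nbrsB_nonneg v color n x y) (by omega) (by omega)

-- the single-start corollary used per scanned cell
theorem flood_eq_dfs (v : List (List Int)) (color n i j : Int) (ch : List (List Int))
    (f : Nat) (hf : zeros ch < f) (hi : 0 ≤ i) (hj : 0 ≤ j) :
    floodB v color n ch [(i, j)] = dfsA f color i j v ch n := by
  have := sim v color n (zeros ch) ch (le_refl _) f hf i j hi hj []
  rw [this, floodB_nil]

-- generic: two folds agree when their steps agree on states satisfying a preserved invariant
theorem foldl_inv_congr {α β : Type} (P : α → Prop) (Q : β → Prop) (f g : α → β → α) :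
    ∀ (l : List β), (∀ b ∈ l, Q b) → (∀ a b, P a → Q b → f a b = g a b ∧ P (f a b)) →
    ∀ a, P a → l.foldl f a = l.foldl g a ∧ P (l.foldl f a) := by
  intro l
  induction l with
  | nil => intro _ _ a ha; exact ⟨rfl, ha⟩
  | cons b t ih =>
    intro hl hfg a ha
    obtain ⟨he, hp⟩ := hfg a b ha (hl b (by simp))
    have := ih (fun c hc => hl c (by simp [hc])) hfg (f a b) hp
    exact ⟨by simp only [List.foldl_cons, he] at this ⊢; exact this.1,
           by simpa [List.foldl_cons] using this.2⟩

theorem zeros_replicate (m : Nat) :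
    zeros (List.replicate m (List.replicate m (0:Int))) = m * m := by
  simp [zeros, List.countP_replicate, List.map_replicate, List.sum_replicate, smul_eq_mul]

-- the two scan bodies agree and preserve the zeros bound
theorem body_eq (v : List (List Int)) (N : Nat) (st : List Int × List (List Int))
    (i j : Int) (hi : 0 ≤ i) (hj : 0 ≤ j) (hz : zeros st.2 ≤ N) :
    ((match get2 st.2 i j with
      | none => st
      | some c =>
        if c ≠ 0 then st
        else
          match get2 v i j with
          | none => st
          | some jak => (incAns st.1 jak, dfsA (N + 1) jak i j v st.2 (v.length : Int))) =
     (match get2 st.2 i j with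
      | none => st
      | some c =>
        if c ≠ 0 then st
        else
          match get2 v i j with
          | none => st
          | some color => (incAns st.1 color, floodB v color (v.length : Int) st.2 [(i, j)]))) ∧
    zeros (match get2 st.2 i j with
      | none => st
      | some c =>
        if c ≠ 0 then st
        else
          match get2 v i j with
          | none => st
          | some jak => (incAns st.1 jak, dfsA (N + 1) jak i j v st.2 (v.length : Int))).2 ≤ N := by
  constructor
  · split
    · rfl
    · split
      · rfl
      · split
        · rfl
        · rename_i c hgc heq hv
          rw [flood_eq_dfs v _ (v.length : Int) i j st.2 (N + 1) (by omega) hi hj]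
  · split
    · exact hz
    · split
      · exact hz
      · split
        · exact hz
        · exact le_trans (dfsA_zeros (N + 1) _ i j v st.2 _) hz

-- ===== VERDICT (by name: the statement is the Claim_ definition above) =====
theorem solution_spec : Claim_equal_solution := by
  intro v _ _
  unfold Spec_solution solution solution_alt
  have hmem : ∀ x ∈ PySem.List.pyRange 0 (v.length : Int) 1, (0:Int) ≤ x := by
    intro x hx
    exact ((PySem.List.mem_pyRange_one).mp hx).1
  have main := foldl_inv_congr
    (fun st : List Int × List (List Int) => zeros st.2 ≤ v.length * v.length)
    (fun i : Int => 0 ≤ i)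
    (fun st i =>
      (PySem.List.pyRange 0 (v.length : Int) 1).foldl (fun st j =>
        match get2 st.2 i j with
        | none => st
        | some c =>
          if c ≠ 0 then st
          else
            match get2 v i j with
            | none => st
            | some jak =>
              (incAns st.1 jak, dfsA (v.length * v.length + 1) jak i j v st.2 (v.length : Int))) st)
    (fun st i =>
      (PySem.List.pyRange 0 (v.length : Int) 1).foldl (fun st j =>
        match get2 st.2 i j with
        | none => st
        | some c =>
          if c ≠ 0 then st
          else
            match get2 v i j with
            | none => st
            | some color => (incAns st.1 color, floodB v color (v.length : Int) st.2 [(i, j)])) st)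
    (PySem.List.pyRange 0 (v.length : Int) 1) hmem
    (by
      intro st i hst hi
      exact foldl_inv_congr
        (fun st : List Int × List (List Int) => zeros st.2 ≤ v.length * v.length)
        (fun j : Int => 0 ≤ j) _ _
        (PySem.List.pyRange 0 (v.length : Int) 1) hmem
        (fun st j hst hj => body_eq v (v.length * v.length) st i j hi hj hst)
        st hst)
    (([0, 0, 0], List.replicate v.length (List.replicate v.length (0:Int))) :
      List Int × List (List Int))
    (by dsimp only; exact le_of_eq (zeros_replicate v.length))
  dsimp only
  rw [main.1]
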